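-- pv_equiv track=rewrite | github.com/GitHCQ/FirstYear-EII | FI/propuestos/Nueve.py | max_columna
-- ===== SOURCE A (Python) =====
-- def max_columna(matriz):
--     fila=len(matriz)
--     columna=len(matriz[0])
--     maximoColumna=[]
--     for j in range(columna):
--         maximo_columna = max(matriz[i][j] for i in range(fila))
--         maximoColumna.append(maximo_columna)
--     return maximoColumna
-- ===== SOURCE B (Python) =====
-- def max_columna(matriz):
--     maxes = list(matriz[0])
--     for fila in matriz[1:]:
--         for j in range(len(maxes)):
--             maxes[j] = max(maxes[j], fila[j])
--     return maxes
-- ===== Notes on version B (the rewrite author's own statement) =====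
-- stated objective: alternative
-- what changed: Replaces the column-major double pass (one max-reduction per column index) by a single row-major sweep that maintains a running per-column maximum vector initialized from the first row.
import Mathlib
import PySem

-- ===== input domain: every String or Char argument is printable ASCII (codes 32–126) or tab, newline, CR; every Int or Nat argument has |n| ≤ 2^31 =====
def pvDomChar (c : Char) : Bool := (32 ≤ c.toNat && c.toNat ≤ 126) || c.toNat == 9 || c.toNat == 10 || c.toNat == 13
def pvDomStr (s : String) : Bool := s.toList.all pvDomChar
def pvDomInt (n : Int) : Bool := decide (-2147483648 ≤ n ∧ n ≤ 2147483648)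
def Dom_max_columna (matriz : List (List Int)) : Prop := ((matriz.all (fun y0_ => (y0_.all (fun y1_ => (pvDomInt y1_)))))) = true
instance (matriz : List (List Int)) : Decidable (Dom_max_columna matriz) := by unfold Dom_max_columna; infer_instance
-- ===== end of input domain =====

-- B replaces A's column-major double pass by one row-major sweep keeping a running
-- per-column maximum vector (alternative decomposition, same cost).

-- ===== PORT A =====
-- matriz[i] / matriz[i][j] raise IndexError out of range; ported with pyGetD
-- (default never reached inside Pre_, which excludes exactly the raising inputs).
def max_columna (matriz : List (List Int)) : List Int :=
  let fila : Int := matriz.length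
  let columna : Int := (PySem.List.pyGetD matriz 0 []).length
  (PySem.List.pyRange 0 columna 1).foldl
    (fun maximoColumna j =>
      let maximo_columna :=
        (PySem.List.max?
          ((PySem.List.pyRange 0 fila 1).map
            (fun i => PySem.List.pyGetD (PySem.List.pyGetD matriz i []) j 0))
          (fun x => x)).getD 0
      maximoColumna ++ [maximo_columna]) []

-- ===== PORT B =====
def max_columna_alt (matriz : List (List Int)) : List Int :=
  match matriz with
  | [] => []   -- matriz[0] raises in Python; excluded by Pre_
  | f :: rest =>
    rest.foldl
      (fun maxes fila =>
        (List.range maxes.length).map (fun j => max (maxes.getD j 0) (fila.getD j 0)))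
      f

-- ===== PRECONDITION & SPEC =====
-- Pre_ excludes exactly the inputs on which Python A raises IndexError:
-- the empty matrix (matriz[0]) and jagged matrices with a row shorter than the first row.
def Pre_max_columna (matriz : List (List Int)) : Prop :=
  matriz ≠ [] ∧ ∀ row ∈ matriz, (matriz.headD []).length ≤ row.length
instance (matriz : List (List Int)) : Decidable (Pre_max_columna matriz) := by
  unfold Pre_max_columna; infer_instance
def pvWitness_max_columna : List (List Int) := [[1, 5], [3, 2]]

def Spec_max_columna (matriz : List (List Int)) (out : List Int) : Prop := out = max_columna_alt matriz
instance (matriz : List (List Int)) (out : List Int) : Decidable (Spec_max_columna matriz out) := by unfold Spec_max_columna; infer_instance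

-- ===== CLAIM (what is proved, stated in full; the proofs are below) =====
def Claim_equal_max_columna : Prop := ∀ (matriz : List (List Int)), Dom_max_columna matriz → Pre_max_columna matriz → Spec_max_columna matriz (max_columna matriz)

-- ===== LEMMAS AND PROOFS =====

-- append-fold builds the map
theorem foldl_append_map {α β : Type} (g : α → β) (l : List α) (acc : List β) :
    l.foldl (fun a j => a ++ [g j]) acc = acc ++ l.map g := by
  induction l generalizing acc with
  | nil => simp
  | cons x t ih => simp [List.foldl_cons, ih, List.append_assoc]

-- indexing over range = map over the list itself
theorem map_range_getD {α β : Type} (f : α → β) (d : α) (l : List α) :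
    (List.range l.length).map (fun i => f (l.getD i d)) = l.map f := by
  induction l with
  | nil => simp
  | cons x t ih =>
      simp only [List.length_cons, List.range_succ_eq_map, List.map_cons, List.map_map]
      simpa using ih

-- B: the fold preserves the length of the accumulator
theorem alt_fold_length (rows : List (List Int)) (maxes : List Int) :
    (rows.foldl
      (fun maxes fila =>
        (List.range maxes.length).map (fun j => max (maxes.getD j 0) (fila.getD j 0)))
      maxes).length = maxes.length := by
  induction rows generalizing maxes with
  | nil => rfl
  | cons r t ih =>
      rw [List.foldl_cons, ih]
      simp

-- B: pointwise characterisation of the fold as a running max per column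
theorem alt_fold_getD (rows : List (List Int)) (maxes : List Int) (j : Nat)
    (hj : j < maxes.length) :
    (rows.foldl
      (fun maxes fila =>
        (List.range maxes.length).map (fun j => max (maxes.getD j 0) (fila.getD j 0)))
      maxes).getD j 0
    = rows.foldl (fun m r => max m (r.getD j 0)) (maxes.getD j 0) := by
  induction rows generalizing maxes with
  | nil => rfl
  | cons r t ih =>
      simp only [List.foldl_cons]
      rw [ih _ (by simpa using hj)]
      congr 1
      rw [List.getD_eq_getElem _ _ (by simpa using hj)]
      simp [hj]

theorem max_columna_spec' (matriz : List (List Int)) (h : Pre_max_columna matriz) :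
    max_columna matriz = max_columna_alt matriz := by
  obtain ⟨hne, _⟩ := h
  obtain ⟨f, rest, rfl⟩ : ∃ f rest, matriz = f :: rest :=
    ⟨matriz.headD [], matriz.tail, by cases matriz with | nil => exact absurd rfl hne | cons a t => rfl⟩
  show max_columna (f :: rest) = _
  -- A's value as a map over column indices
  have hA : max_columna (f :: rest)
      = (List.range f.length).map (fun j =>
          rest.foldl (fun m r => max m (r.getD j 0)) (f.getD j 0)) := by
    unfold max_columna
    dsimp only
    have h0 : PySem.List.pyGetD (f :: rest) 0 [] = f := by simp [PySem.List.pyGetD, PySem.List.pyGet?, PySem.List.pyIdx?]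
    rw [h0]
    rw [PySem.List.pyRange_zero_natCast, PySem.List.pyRange_zero_natCast]
    rw [foldl_append_map, List.nil_append, List.map_map]
    refine List.map_congr_left (fun j hj => ?_)
    simp only [Function.comp_apply]
    rw [List.map_map]
    have hrow : ((List.range (f :: rest).length).map
          ((fun i => PySem.List.pyGetD (PySem.List.pyGetD (f :: rest) i []) ((j : Nat) : Int) 0) ∘ fun k => ((k : Nat) : Int)))
        = (f :: rest).map (fun r => r.getD j 0) := by
      rw [← map_range_getD (fun r : List Int => r.getD j 0) [] (f :: rest)]
      refine List.map_congr_left (fun i hi => ?_)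
      simp [Function.comp, PySem.List.pyGetD_natCast]
    rw [hrow]
    simp only [List.map_cons, PySem.List.max?_id_cons, Option.getD_some, List.foldl_map]
  rw [hA]
  -- B's value, pointwise
  show _ = max_columna_alt (f :: rest)
  have hBlen : (max_columna_alt (f :: rest)).length = f.length := by
    simpa [max_columna_alt] using alt_fold_length rest f
  apply List.ext_getElem (by simpa using hBlen.symm)
  intro j hj1 hj2
  have hjf : j < f.length := by simpa using hj1
  rw [← List.getD_eq_getElem _ 0 hj2]
  show _ = (max_columna_alt (f :: rest)).getD j 0
  have : (max_columna_alt (f :: rest)).getD j 0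
      = rest.foldl (fun m r => max m (r.getD j 0)) (f.getD j 0) := by
    simpa [max_columna_alt] using alt_fold_getD rest f j hjf
  rw [this]
  simp [hjf]

-- ===== VERDICT (by name: the statement is the Claim_ definition above) =====
theorem max_columna_spec : Claim_equal_max_columna := by
  intro matriz _ hpre
  exact max_columna_spec' matriz hpre
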